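-- pv_equiv track=rewrite | github.com/Inventure71/GenGame | coding/tools/modify_inline.py | _locate_hunk_start
-- ===== SOURCE A (Python) =====
-- from typing import List, Optional, Tuple
--
-- def _locate_hunk_start(original_lines: List[str], old_start: int, ops: List[str], window: int = 60) -> Optional[int]:
--     """
--     Relocate hunk near expected old_start using a small anchor sequence.
--     Conservative approach: if no anchors exist, do not relocate.
--     """
--     anchors: List[str] = []
--     for op in ops:
--         if not op:
--             continue
--         if op[0] in (" ", "-"):
--             anchors.append(op[1:].strip())
--         if len(anchors) >= 3:
--             break
--
--     if not anchors:
--         return old_start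
--
--     expected_idx = max(0, min(len(original_lines), old_start - 1))
--     start_idx = max(0, expected_idx - window)
--     end_idx = min(len(original_lines), expected_idx + window)
--
--     def matches_at(i0: int) -> bool:
--         j = i0
--         for a in anchors:
--             if j >= len(original_lines):
--                 return False
--             if original_lines[j].strip() != a:
--                 return False
--             j += 1
--         return True
--
--     if matches_at(expected_idx):
--         return expected_idx + 1
--
--     for delta in range(1, window + 1):
--         left = expected_idx - delta
--         right = expected_idx + delta
--         if left >= start_idx and matches_at(left):
--             return left + 1
--         if right < end_idx and matches_at(right):
--             return right + 1
--
--     return None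
-- ===== SOURCE B (Python) =====
-- from typing import List, Optional
--
-- def _locate_hunk_start(original_lines: List[str], old_start: int, ops: List[str], window: int = 60) -> Optional[int]:
--     anchors = [op[1:].strip() for op in ops if op and op[0] in (" ", "-")][:3]
--     if not anchors:
--         return old_start
--
--     n = len(original_lines)
--     expected = max(0, min(n, old_start - 1))
--     lo = max(0, expected - window)
--     hi = min(n, expected + window)
--
--     def ok(i: int) -> bool:
--         return [line.strip() for line in original_lines[i:i + len(anchors)]] == anchors
--
--     # consider the expected position itself plus every index in the window
--     matches = [i for i in [expected, *range(lo, hi)] if ok(i)]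
--     if not matches:
--         return None
--     return min(matches, key=lambda i: (abs(i - expected), i > expected)) + 1
-- ===== Notes on version B (the rewrite author's own statement) =====
-- stated objective: simpler
-- what changed: A's expanding-ring search with early return (probe expected, then left/right at growing delta) is replaced by collecting all matching candidate indices (the expected position plus the window) in one pass and taking the minimum under the key (distance to expected, prefer-left); the anchor list is built by a filter/map/take comprehension instead of an accumulate-and-break loop, and the anchor check compares a stripped slice instead of a manual index walk.
import Mathlib
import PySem

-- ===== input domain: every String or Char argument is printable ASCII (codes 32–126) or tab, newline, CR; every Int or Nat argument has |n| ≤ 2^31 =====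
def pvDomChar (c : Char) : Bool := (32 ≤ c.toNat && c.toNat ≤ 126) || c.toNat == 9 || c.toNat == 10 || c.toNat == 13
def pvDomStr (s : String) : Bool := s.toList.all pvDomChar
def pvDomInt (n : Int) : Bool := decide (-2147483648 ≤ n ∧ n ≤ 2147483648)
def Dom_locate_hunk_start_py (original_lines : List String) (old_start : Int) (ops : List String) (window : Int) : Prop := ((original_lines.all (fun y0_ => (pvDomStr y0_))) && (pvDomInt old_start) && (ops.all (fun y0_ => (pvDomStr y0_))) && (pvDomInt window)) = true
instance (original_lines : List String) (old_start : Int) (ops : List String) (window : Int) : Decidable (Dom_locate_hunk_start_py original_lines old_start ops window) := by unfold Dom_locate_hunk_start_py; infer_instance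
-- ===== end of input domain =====

-- B replaces A's expanding-ring search (probe expected, then ±1, ±2, … with early return)
-- by collecting all matching candidate indices in one pass and picking the minimum under the
-- key (distance to expected, right-of-expected); objective: simpler decomposition, same cost.

-- ===== PORT A =====
-- anchors loop of A: append op[1:].strip() for ops starting with ' '/'-', break at 3
def pvBuildAnchorsA : List String → List String → List String
  | acc, [] => acc
  | acc, op :: rest =>
    if op = "" then pvBuildAnchorsA acc rest
    else
      let acc' := if (PySem.Str.pyGet? op 0 == some ' ' || PySem.Str.pyGet? op 0 == some '-')
                  then acc ++ [PySem.Str.strip (PySem.Str.slice op (some 1) none)] else acc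
      if 3 ≤ acc'.length then acc' else pvBuildAnchorsA acc' rest

-- matches_at of A: walk the anchors, j incrementing, bail on j >= len or a strip mismatch
def pvMatchesAtA (lines : List String) : Int → List String → Bool
  | _, [] => true
  | j, a :: rest =>
    if (lines.length : Int) ≤ j then false
    else
      match PySem.List.pyGet? lines j with
      | none => false
      | some s => if PySem.Str.strip s ≠ a then false else pvMatchesAtA lines (j + 1) rest

-- the 'for delta in range(1, window+1)' ring loop of A
def pvRingA (lines anchors : List String) (expected lo hi : Int) : Nat → Int → Option Int
  | 0, _ => none
  | fuel + 1, delta =>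
    let left := expected - delta
    let right := expected + delta
    if lo ≤ left ∧ pvMatchesAtA lines left anchors = true then some (left + 1)
    else if right < hi ∧ pvMatchesAtA lines right anchors = true then some (right + 1)
    else pvRingA lines anchors expected lo hi fuel (delta + 1)

def locate_hunk_start_py (original_lines : List String) (old_start : Int) (ops : List String) (window : Int) : Option Int :=
  let anchors := pvBuildAnchorsA [] ops
  if anchors = [] then some old_start
  else
    let n : Int := original_lines.length
    let expected := max 0 (min n (old_start - 1))
    let lo := max 0 (expected - window)
    let hi := min n (expected + window)
    if pvMatchesAtA original_lines expected anchors = true then some (expected + 1)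
    else pvRingA original_lines anchors expected lo hi window.toNat 1

-- ===== PORT B =====
-- anchors as a comprehension: filter, map, take 3
def pvAnchorsB (ops : List String) : List String :=
  ((ops.filter (fun op => decide (op ≠ "") &&
      (PySem.Str.pyGet? op 0 == some ' ' || PySem.Str.pyGet? op 0 == some '-'))).map
    (fun op => PySem.Str.strip (PySem.Str.slice op (some 1) none))).take 3

-- ok(i) of B: stripped slice of len(anchors) lines equals anchors
def pvOkB (lines anchors : List String) (i : Int) : Bool :=
  (PySem.List.slice lines (some i) (some (i + anchors.length))).map PySem.Str.strip == anchors

def locate_hunk_start_py_alt (original_lines : List String) (old_start : Int) (ops : List String) (window : Int) : Option Int :=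
  let anchors := pvAnchorsB ops
  if anchors = [] then some old_start
  else
    let n : Int := original_lines.length
    let expected := max 0 (min n (old_start - 1))
    let lo := max 0 (expected - window)
    let hi := min n (expected + window)
    let found := (expected :: PySem.List.pyRange lo hi 1).filter (pvOkB original_lines anchors)
    match PySem.List.min2? found (fun i => |i - expected|)
        (fun i => if expected < i then (1 : Int) else 0) with
    | none => none
    | some b => some (b + 1)

-- ===== PRECONDITION & SPEC =====
def Spec_locate_hunk_start_py (original_lines : List String) (old_start : Int) (ops : List String) (window : Int) (out : Option Int) : Prop := out = locate_hunk_start_py_alt original_lines old_start ops window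
instance (original_lines : List String) (old_start : Int) (ops : List String) (window : Int) (out : Option Int) : Decidable (Spec_locate_hunk_start_py original_lines old_start ops window out) := by unfold Spec_locate_hunk_start_py; infer_instance

-- ===== CLAIM (what is proved, stated in full; the proofs are below) =====
def Claim_equal_locate_hunk_start_py : Prop := ∀ (original_lines : List String) (old_start : Int) (ops : List String) (window : Int), Dom_locate_hunk_start_py original_lines old_start ops window → Spec_locate_hunk_start_py original_lines old_start ops window (locate_hunk_start_py original_lines old_start ops window)

-- ===== LEMMAS AND PROOFS =====

-- A's probe order: expected is probed first (in the entry), then for each delta the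
-- admissible left index, then the admissible right index.
def pvProbe (e lo hi : Int) : Nat → Int → List Int
  | 0, _ => []
  | fuel + 1, delta =>
      (if lo ≤ e - delta then [e - delta] else []) ++
      (if e + delta < hi then [e + delta] else []) ++
      pvProbe e lo hi fuel (delta + 1)

-- the strict "searched earlier by A" order, phrased through B's selection key
def pvK2 (e i : Int) : Int := if e < i then 1 else 0

def pvKlt (e x y : Int) : Prop := |x - e| < |y - e| ∨ (|x - e| = |y - e| ∧ pvK2 e x < pvK2 e y)

-- the comparison min2? actually computes with
def pvBlt (k1 k2 : Int → Int) (x m : Int) : Prop := k1 x < k1 m ∨ (¬ k1 m < k1 x ∧ k2 x < k2 m)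

theorem pv_anchors_eq (ops acc : List String) (h : acc.length < 3) :
    pvBuildAnchorsA acc ops =
      (acc ++ (ops.filter (fun op => decide (op ≠ "") &&
        (PySem.Str.pyGet? op 0 == some ' ' || PySem.Str.pyGet? op 0 == some '-'))).map
        (fun op => PySem.Str.strip (PySem.Str.slice op (some 1) none))).take 3 := by
  induction ops generalizing acc with
  | nil => simp [pvBuildAnchorsA, List.take_of_length_le (le_of_lt h)]
  | cons op rest ih =>
    by_cases hop : op = ""
    · subst hop
      simp [pvBuildAnchorsA, ih acc h]
    · by_cases hc : (PySem.Str.pyGet? op 0 == some ' ' || PySem.Str.pyGet? op 0 == some '-') = true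
      · by_cases hl : acc.length = 2
        · have : 3 ≤ (acc ++ [PySem.Str.strip (PySem.Str.slice op (some 1) none)]).length := by
            simp [hl]
          simp only [pvBuildAnchorsA, if_neg hop, hc, if_true, if_pos this]
          rw [List.filter_cons_of_pos (by simp [hop]; simpa using hc), List.map_cons,
            show acc ++ PySem.Str.strip (PySem.Str.slice op (some 1) none) ::
              (List.map _ (List.filter _ rest)) =
              (acc ++ [PySem.Str.strip (PySem.Str.slice op (some 1) none)]) ++
              (List.map (fun op => PySem.Str.strip (PySem.Str.slice op (some 1) none))
                (List.filter (fun op => decide (op ≠ "") &&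
                  (PySem.Str.pyGet? op 0 == some ' ' || PySem.Str.pyGet? op 0 == some '-')) rest))
              from by simp]
          rw [List.take_append_of_le_length (by simp [hl])]
          simp [List.take_of_length_le, hl]
        · have h3 : ¬ 3 ≤ (acc ++ [PySem.Str.strip (PySem.Str.slice op (some 1) none)]).length := by
            simp; omega
          simp only [pvBuildAnchorsA, if_neg hop, hc, if_true, if_neg h3]
          rw [ih _ (by simp; omega)]
          rw [List.filter_cons_of_pos (by simp [hop]; simpa using hc)]
          simp
      · have hc' : (PySem.Str.pyGet? op 0 == some ' ' || PySem.Str.pyGet? op 0 == some '-') = false := by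
          simpa using hc
        simp only [pvBuildAnchorsA, if_neg hop, hc', Bool.false_eq_true, if_false,
          if_neg (show ¬ 3 ≤ acc.length by omega)]
        rw [ih _ h, List.filter_cons_of_neg (by simp only [hc', Bool.and_false, Bool.false_eq_true, not_false_iff])]

theorem pv_matches_eq (lines anchors : List String) (j : Int) (hj : 0 ≤ j) :
    pvMatchesAtA lines j anchors = pvOkB lines anchors j := by
  induction anchors generalizing j with
  | nil =>
    have hsl : PySem.List.slice lines (some j) (some j) = [] := by
      rw [PySem.List.slice_toNat lines hj hj]; simp
    simp [pvMatchesAtA, pvOkB, hsl]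
  | cons a rest ih =>
    obtain ⟨jn, rfl⟩ : ∃ jn : Nat, j = (jn : Int) := ⟨j.toNat, (Int.toNat_of_nonneg hj).symm⟩
    have hsl : PySem.List.slice lines (some (jn : Int)) (some ((jn : Int) + (a :: rest).length)) =
        (lines.drop jn).take (rest.length + 1) := by
      rw [show ((a :: rest).length : Int) = ((rest.length + 1 : Nat) : Int) by simp,
        PySem.List.slice_natCast_add]
    rw [pvMatchesAtA, pvOkB, hsl]
    by_cases hlen : lines.length ≤ jn
    · rw [if_pos (by exact_mod_cast hlen)]
      rw [List.drop_of_length_le hlen]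
      simp
    · rw [if_neg (by exact_mod_cast hlen)]
      have hlt : jn < lines.length := by omega
      rw [PySem.List.pyGet?_natCast, List.getElem?_eq_getElem hlt]
      rw [← List.getElem_cons_drop (as := lines) (i := jn) (h := hlt), List.take_succ_cons, List.map_cons]
      rw [show (match some lines[jn] with
          | none => false
          | some s => if PySem.Str.strip s ≠ a then false else pvMatchesAtA lines ((jn : Int) + 1) rest)
          = if PySem.Str.strip lines[jn] ≠ a then false
            else pvMatchesAtA lines ((jn : Int) + 1) rest from rfl]
      by_cases hstr : PySem.Str.strip lines[jn] = a
      · rw [if_neg (by simpa using hstr)]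
        have := ih (((jn + 1 : Nat) : Int)) (by omega)
        rw [show ((jn : Int) + 1) = ((jn + 1 : Nat) : Int) by push_cast; ring]
        rw [this, pvOkB]
        have hsl2 : PySem.List.slice lines (some ((jn + 1 : Nat) : Int))
            (some (((jn + 1 : Nat) : Int) + rest.length)) = (lines.drop (jn + 1)).take rest.length := by
          rw [show ((rest.length : Nat) : Int) = ((rest.length : Nat) : Int) by rfl,
            PySem.List.slice_natCast_add]
        rw [hsl2]
        simp [hstr]
      · rw [if_pos (by simpa using hstr)]
        simp [hstr]

theorem pv_ring_eq_find (lines anchors : List String) (e lo hi : Int) (fuel : Nat) (delta : Int) :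
    pvRingA lines anchors e lo hi fuel delta =
      ((pvProbe e lo hi fuel delta).find? (fun i => pvMatchesAtA lines i anchors)).map (· + 1) := by
  induction fuel generalizing delta with
  | zero => simp [pvRingA, pvProbe]
  | succ fuel ih =>
    rw [pvRingA, pvProbe]
    by_cases h1 : lo ≤ e - delta <;>
      by_cases hp1 : pvMatchesAtA lines (e - delta) anchors = true <;>
      by_cases h2 : e + delta < hi <;>
      by_cases hp2 : pvMatchesAtA lines (e + delta) anchors = true <;>
      simp [h1, hp1, h2, hp2, List.find?, ih]

theorem pv_mem_ite_singleton {c : Prop} [Decidable c] {x y : Int} :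
    (y ∈ if c then [x] else []) ↔ c ∧ y = x := by
  split_ifs with h <;> simp [h]

theorem pv_mem_probe (e lo hi : Int) (fuel : Nat) (delta y : Int) :
    y ∈ pvProbe e lo hi fuel delta ↔
      ∃ t : Nat, t < fuel ∧ ((y = e - (delta + t) ∧ lo ≤ y) ∨ (y = e + (delta + t) ∧ y < hi)) := by
  induction fuel generalizing delta with
  | zero => simp [pvProbe]
  | succ fuel ih =>
    simp only [pvProbe, List.mem_append, pv_mem_ite_singleton, ih]
    constructor
    · rintro ((⟨h1, rfl⟩ | ⟨h2, rfl⟩) | ⟨t, ht, h⟩)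
      · exact ⟨0, by omega, by omega⟩
      · exact ⟨0, by omega, by omega⟩
      · exact ⟨t + 1, by omega, by omega⟩
    · rintro ⟨t, ht, h⟩
      cases t with
      | zero =>
        rcases h with ⟨h, h'⟩ | ⟨h, h'⟩
        · exact Or.inl (Or.inl ⟨by omega, by omega⟩)
        · exact Or.inl (Or.inr ⟨by omega, by omega⟩)
      | succ t' => exact Or.inr ⟨t', by omega, by omega⟩

theorem pv_probe_pairwise (e lo hi : Int) (fuel : Nat) (delta : Int) (hd : 1 ≤ delta) :
    (pvProbe e lo hi fuel delta).Pairwise (pvKlt e) := by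
  induction fuel generalizing delta with
  | zero => simp [pvProbe]
  | succ fuel ih =>
    have habs : ∀ y ∈ pvProbe e lo hi fuel (delta + 1), delta + 1 ≤ |y - e| := by
      intro y hy
      rw [pv_mem_probe] at hy
      obtain ⟨t, ht, h⟩ := hy
      rcases h with ⟨h, _⟩ | ⟨h, _⟩
      · rw [show y - e = -(delta + 1 + t) by omega, abs_neg, abs_of_nonneg (by omega)]; omega
      · rw [show y - e = delta + 1 + t by omega, abs_of_nonneg (by omega)]; omega
    have hL : |e - delta - e| = delta := by
      rw [show e - delta - e = -delta by ring, abs_neg, abs_of_nonneg (by omega)]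
    have hR : |e + delta - e| = delta := by
      rw [show e + delta - e = delta by ring, abs_of_nonneg (by omega)]
    rw [pvProbe]
    apply List.pairwise_append.mpr
    refine ⟨List.pairwise_append.mpr ⟨?_, ?_, ?_⟩, ih (delta + 1) (by omega), ?_⟩
    · split_ifs <;> simp
    · split_ifs <;> simp
    · intro x hx y hy
      rw [pv_mem_ite_singleton] at hx hy
      right
      constructor
      · rw [hx.2, hy.2, hL, hR]
      · rw [hx.2, hy.2]
        simp [pvK2, show ¬ e < e - delta by omega, show e < e + delta by omega]
    · intro x hx y hy
      left
      have hx' : |x - e| = delta := by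
        rcases List.mem_append.mp hx with hx | hx <;> rw [pv_mem_ite_singleton] at hx <;>
          rw [hx.2]
        · exact hL
        · exact hR
      have := habs y hy
      omega

theorem pv_find_first_min {L : List Int} {P : Int → Bool} {e m : Int}
    (hp : L.Pairwise (pvKlt e)) (hf : L.find? P = some m) :
    P m = true ∧ m ∈ L ∧ ∀ y ∈ L, P y = true → y = m ∨ pvKlt e m y := by
  induction L with
  | nil => simp at hf
  | cons x rest ih =>
    rw [List.pairwise_cons] at hp
    by_cases hx : P x = true
    · rw [List.find?_cons_of_pos (h := hx)] at hf
      obtain rfl : x = m := by injection hf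
      refine ⟨hx, List.mem_cons_self, ?_⟩
      intro y hy _
      rcases List.mem_cons.mp hy with rfl | hy
      · exact Or.inl rfl
      · exact Or.inr (hp.1 y hy)
    · rw [List.find?_cons_of_neg (h := hx)] at hf
      obtain ⟨h1, h2, h3⟩ := ih hp.2 hf
      refine ⟨h1, List.mem_cons_of_mem _ h2, ?_⟩
      intro y hy hPy
      rcases List.mem_cons.mp hy with rfl | hy
      · exact absurd hPy hx
      · exact h3 y hy hPy

def pvStep (k1 k2 : Int → Int) (acc : Option Int) (x : Int) : Option Int :=
  match acc with
  | none => some x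
  | some m => if (decide (k1 x < k1 m) || !decide (k1 m < k1 x) && decide (k2 x < k2 m)) = true
              then some x else some m

theorem pv_min2_go (k1 k2 : Int → Int) (xs : List Int) (a : Int) :
    ∃ b, List.foldl (pvStep k1 k2) (some a) xs = some b ∧
      (b = a ∨ b ∈ xs) ∧ ¬ pvBlt k1 k2 a b ∧ ∀ y ∈ xs, ¬ pvBlt k1 k2 y b := by
  induction xs generalizing a with
  | nil =>
    refine ⟨a, rfl, Or.inl rfl, ?_, by simp⟩
    unfold pvBlt; omega
  | cons x xs ih =>
    have hstep : pvStep k1 k2 (some a) x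
        = if (decide (k1 x < k1 a) || !decide (k1 a < k1 x) && decide (k2 x < k2 a)) = true
          then some x else some a := rfl
    rw [List.foldl_cons, hstep]
    by_cases hc : (decide (k1 x < k1 a) || !decide (k1 a < k1 x) && decide (k2 x < k2 a)) = true
    · rw [if_pos hc]
      have hxa : pvBlt k1 k2 x a := by
        unfold pvBlt; simpa using hc
      obtain ⟨b, hb, hmem, hna, hall⟩ := ih x
      refine ⟨b, hb, ?_, ?_, ?_⟩
      · rcases hmem with rfl | hmem
        · exact Or.inr List.mem_cons_self
        · exact Or.inr (List.mem_cons_of_mem _ hmem)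
      · intro hab
        exact hna (by unfold pvBlt at *; omega)
      · intro y hy
        rcases List.mem_cons.mp hy with rfl | hy
        · exact hna
        · exact hall y hy
    · rw [if_neg hc]
      have hxa : ¬ pvBlt k1 k2 x a := by
        unfold pvBlt; intro h
        exact hc (by simpa using h)
      obtain ⟨b, hb, hmem, hna, hall⟩ := ih a
      refine ⟨b, hb, ?_, hna, ?_⟩
      · rcases hmem with rfl | hmem
        · exact Or.inl rfl
        · exact Or.inr (List.mem_cons_of_mem _ hmem)
      · intro y hy
        rcases List.mem_cons.mp hy with rfl | hy
        · intro hyb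
          unfold pvBlt at *; omega
        · exact hall y hy

theorem pv_min2_unique (k1 k2 : Int → Int) (xs : List Int) (m : Int) (hm : m ∈ xs)
    (hmin : ∀ y ∈ xs, y ≠ m → k1 m < k1 y ∨ (k1 m = k1 y ∧ k2 m < k2 y)) :
    PySem.List.min2? xs k1 k2 = some m := by
  cases xs with
  | nil => simp at hm
  | cons x rest =>
    obtain ⟨b, hb, hmem, hna, hall⟩ := pv_min2_go k1 k2 rest x
    have hres : PySem.List.min2? (x :: rest) k1 k2 = some b := by
      unfold PySem.List.min2?
      rw [List.foldl_cons]
      exact Eq.trans (List.foldl_ext _ (pvStep k1 k2) _ (fun acc y _ => by cases acc <;> rfl)) hb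
    have hbxs : b ∈ x :: rest := by
      rcases hmem with rfl | hmem
      · exact List.mem_cons_self
      · exact List.mem_cons_of_mem _ hmem
    have hnb : ¬ pvBlt k1 k2 m b := by
      rcases List.mem_cons.mp hm with rfl | hm'
      · exact hna
      · exact hall m hm'
    rcases eq_or_ne b m with rfl | hne
    · exact hres
    · exact absurd (by have := hmin b hbxs hne; unfold pvBlt; omega) hnb

theorem pv_main (lines anchors : List String) (e lo hi w : Int)
    (he : 0 ≤ e) (hen : e ≤ (lines.length : Int))
    (hlo : lo = max 0 (e - w)) (hhi : hi = min (lines.length : Int) (e + w)) :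
    (if pvMatchesAtA lines e anchors = true then some (e + 1)
     else pvRingA lines anchors e lo hi w.toNat 1)
    = (PySem.List.min2?
        ((e :: PySem.List.pyRange lo hi 1).filter (pvOkB lines anchors))
        (fun i => |i - e|) (fun i => if e < i then (1 : Int) else 0)).map (· + 1) := by
  have hLC : ∀ y, y ∈ e :: pvProbe e lo hi w.toNat 1 ↔ y ∈ e :: PySem.List.pyRange lo hi 1 := by
    intro y
    simp only [List.mem_cons, PySem.List.mem_pyRange_one, pv_mem_probe]
    constructor
    · rintro (rfl | ⟨t, ht, h⟩)
      · exact Or.inl rfl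
      · right; omega
    · rintro (rfl | ⟨h1, h2⟩)
      · exact Or.inl rfl
      · by_cases hye : y = e
        · exact Or.inl hye
        · right
          by_cases hlt : y < e
          · exact ⟨(e - y - 1).toNat, by omega, by omega⟩
          · exact ⟨(y - e - 1).toNat, by omega, by omega⟩
  have hCnonneg : ∀ y, y ∈ e :: PySem.List.pyRange lo hi 1 → 0 ≤ y := by
    intro y hy
    rcases List.mem_cons.mp hy with rfl | hy
    · exact he
    · have := PySem.List.mem_pyRange_one.mp hy; omega
  have hfilter : (e :: PySem.List.pyRange lo hi 1).filter (pvOkB lines anchors) =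
      (e :: PySem.List.pyRange lo hi 1).filter (fun i => pvMatchesAtA lines i anchors) := by
    apply List.filter_congr
    intro y hy
    exact (pv_matches_eq lines anchors y (hCnonneg y hy)).symm
  have habs1 : ∀ y ∈ pvProbe e lo hi w.toNat 1, 1 ≤ |y - e| := by
    intro y hy
    rw [pv_mem_probe] at hy
    obtain ⟨t, ht, h⟩ := hy
    rcases h with ⟨h, _⟩ | ⟨h, _⟩
    · rw [show y - e = -(1 + (t : Int)) by omega, abs_neg, abs_of_nonneg (by omega)]; omega
    · rw [show y - e = 1 + (t : Int) by omega, abs_of_nonneg (by omega)]; omega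
  have hpair : (e :: pvProbe e lo hi w.toNat 1).Pairwise (pvKlt e) := by
    rw [List.pairwise_cons]
    refine ⟨?_, pv_probe_pairwise e lo hi w.toNat 1 (by omega)⟩
    intro y hy
    left
    rw [sub_self, abs_zero]
    have := habs1 y hy
    omega
  have hA2 : (if pvMatchesAtA lines e anchors = true then some (e + 1)
      else pvRingA lines anchors e lo hi w.toNat 1)
      = ((e :: pvProbe e lo hi w.toNat 1).find?
          (fun i => pvMatchesAtA lines i anchors)).map (· + 1) := by
    rw [pv_ring_eq_find]
    by_cases hme : pvMatchesAtA lines e anchors = true <;> simp [hme]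
  rw [hA2, hfilter]
  cases hf : (e :: pvProbe e lo hi w.toNat 1).find? (fun i => pvMatchesAtA lines i anchors) with
  | none =>
    rw [List.find?_eq_none] at hf
    have hfil : (e :: PySem.List.pyRange lo hi 1).filter
        (fun i => pvMatchesAtA lines i anchors) = [] :=
      List.filter_eq_nil_iff.mpr (fun y hy => by simpa using hf y ((hLC y).mpr hy))
    rw [hfil]
    rfl
  | some m =>
    obtain ⟨hPm, hmL, hmin⟩ := pv_find_first_min hpair hf
    have hmF : m ∈ (e :: PySem.List.pyRange lo hi 1).filter
        (fun i => pvMatchesAtA lines i anchors) :=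
      List.mem_filter.mpr ⟨(hLC m).mp hmL, hPm⟩
    have huniq : ∀ y ∈ (e :: PySem.List.pyRange lo hi 1).filter
          (fun i => pvMatchesAtA lines i anchors),
        y ≠ m → (fun i => |i - e|) m < (fun i => |i - e|) y ∨
          ((fun i => |i - e|) m = (fun i => |i - e|) y ∧
            (fun i => if e < i then (1 : Int) else 0) m < (fun i => if e < i then (1 : Int) else 0) y) := by
      intro y hy hne
      obtain ⟨hyC, hPy⟩ := List.mem_filter.mp hy
      rcases hmin y ((hLC y).mpr hyC) hPy with rfl | hk
      · exact absurd rfl hne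
      · unfold pvKlt pvK2 at hk
        exact hk
    rw [pv_min2_unique _ _ _ m hmF huniq]

-- ===== VERDICT (by name: the statement is the Claim_ definition above) =====
theorem locate_hunk_start_py_spec : Claim_equal_locate_hunk_start_py := by
  intro lines old_start ops window _
  unfold Spec_locate_hunk_start_py
  simp only [locate_hunk_start_py, locate_hunk_start_py_alt]
  rw [show pvBuildAnchorsA [] ops = pvAnchorsB ops by
    rw [pv_anchors_eq ops [] (by simp)]; simp [pvAnchorsB]]
  set anchors := pvAnchorsB ops with hanch
  by_cases hnil : anchors = []
  · simp [hnil]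
  · simp only [if_neg hnil]
    set e := max 0 (min (lines.length : Int) (old_start - 1)) with he
    set lo := max 0 (e - window) with hlo
    set hi := min (lines.length : Int) (e + window) with hhi
    rw [pv_main lines anchors e lo hi window (by omega) (by omega) hlo hhi]
    cases hm2 : PySem.List.min2?
        ((e :: PySem.List.pyRange lo hi 1).filter (pvOkB lines anchors))
        (fun i => |i - e|) (fun i => if e < i then (1 : Int) else 0) with
    | none => rfl
    | some b => rfl
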